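-- pv_equiv track=rewrite | github.com/bihealth/svirlpool | src/svirlpool/scripts/util.py | get_hash_of_kmer
-- ===== SOURCE A (Python) =====
-- def get_hash_of_kmer(kmer: str, letter_dict: dict) -> int:
--     if not kmer or len(kmer) == 0:
--         raise ValueError("kmer must not be empty")
--     n_letters = len(letter_dict)
--     k = len(kmer)
--     hash_a = sum(
--         [
--             letter_dict.get(kmer[i], len(letter_dict)) * n_letters ** (k - i - 1)
--             for i in range(k)
--         ]
--     )
--     # kmer_rc = str(Seq(kmer).reverse_complement())
--     # hash_b = sum([letter_dict.get(kmer_rc[i],len(letter_dict)) * n_letters**(k-i-1) for i in range(k)])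
--     return hash_a  # min(hash_a,hash_b)
-- ===== SOURCE B (Python) =====
-- def get_hash_of_kmer(kmer: str, letter_dict: dict) -> int:
--     if not kmer:
--         raise ValueError("kmer must not be empty")
--     n = len(letter_dict)
--     h = 0
--     for ch in kmer:
--         h = h * n + letter_dict.get(ch, n)
--     return h
-- ===== Notes on version B (the rewrite author's own statement) =====
-- stated objective: faster
-- what changed: Replaces the list-comprehension sum of per-position big-integer powers n**(k-i-1) with a single Horner pass keeping one running accumulator h = h*n + digit.
import Mathlib
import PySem

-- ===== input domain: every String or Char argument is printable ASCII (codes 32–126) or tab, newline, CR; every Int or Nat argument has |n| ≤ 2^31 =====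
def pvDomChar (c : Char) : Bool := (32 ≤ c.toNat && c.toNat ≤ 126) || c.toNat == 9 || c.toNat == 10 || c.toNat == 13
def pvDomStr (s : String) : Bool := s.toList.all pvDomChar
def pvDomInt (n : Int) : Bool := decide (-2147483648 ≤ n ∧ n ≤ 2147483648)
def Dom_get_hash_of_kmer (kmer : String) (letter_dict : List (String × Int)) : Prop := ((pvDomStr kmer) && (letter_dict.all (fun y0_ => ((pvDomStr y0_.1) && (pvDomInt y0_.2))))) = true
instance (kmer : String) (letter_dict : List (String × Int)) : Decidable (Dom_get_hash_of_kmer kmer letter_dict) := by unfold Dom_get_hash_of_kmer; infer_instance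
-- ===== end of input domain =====

-- ===== PORT A =====
-- B replaces A's per-position powers n**(k-i-1) with one Horner pass (objective: faster).
-- A raises ValueError on an empty kmer: Pre_ excludes kmer = "".
def get_hash_of_kmer (kmer : String) (letter_dict : List (String × Int)) : Int :=
  let n_letters : Int := letter_dict.length
  let k : Int := PySem.Str.len kmer
  -- Python's n ** (k-i-1): exponent is ≥ 0 for every i in range(k), ported as ^ (·).toNat
  (((PySem.List.pyRange 0 k 1).map (fun i =>
      (PySem.Dict.mk letter_dict).getD (String.ofList [PySem.List.pyGetD kmer.toList i ' ']) n_letters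
        * n_letters ^ (k - i - 1).toNat)).sum)

-- ===== PORT B =====
def get_hash_of_kmer_alt (kmer : String) (letter_dict : List (String × Int)) : Int :=
  let n : Int := letter_dict.length
  kmer.toList.foldl
    (fun h ch => h * n + (PySem.Dict.mk letter_dict).getD (String.ofList [ch]) n) 0

-- ===== PRECONDITION & SPEC =====
-- A raises ValueError exactly on the empty kmer; nothing else is excluded.
def Pre_get_hash_of_kmer (kmer : String) (letter_dict : List (String × Int)) : Prop :=
  kmer ≠ ""
instance (kmer : String) (_letter_dict : List (String × Int)) : Decidable (Pre_get_hash_of_kmer kmer _letter_dict) := by unfold Pre_get_hash_of_kmer; infer_instance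
def pvWitness_get_hash_of_kmer : String × (List (String × Int)) := ("AC", [("A", 0), ("C", 1)])
def Spec_get_hash_of_kmer (kmer : String) (letter_dict : List (String × Int)) (out : Int) : Prop := out = get_hash_of_kmer_alt kmer letter_dict
instance (kmer : String) (letter_dict : List (String × Int)) (out : Int) : Decidable (Spec_get_hash_of_kmer kmer letter_dict out) := by unfold Spec_get_hash_of_kmer; infer_instance

-- ===== CLAIM (what is proved, stated in full; the proofs are below) =====
def Claim_equal_get_hash_of_kmer : Prop := ∀ (kmer : String) (letter_dict : List (String × Int)), Dom_get_hash_of_kmer kmer letter_dict → Pre_get_hash_of_kmer kmer letter_dict → Spec_get_hash_of_kmer kmer letter_dict (get_hash_of_kmer kmer letter_dict)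

-- ===== LEMMAS AND PROOFS =====

-- Horner fold, with a generalized accumulator, over cs appended with one char.
theorem horner_foldl_append (f : Char → Int) (n : Int) (cs : List Char) (c : Char) (a : Int) :
    (cs ++ [c]).foldl (fun h ch => h * n + f ch) a
      = (cs.foldl (fun h ch => h * n + f ch) a) * n + f c := by
  simp [List.foldl_append]

-- A's comprehension sum over cs ++ [c] satisfies the same recurrence.
theorem sumA_append (f : Char → Int) (n : Int) (cs : List Char) (c : Char) :
    ((PySem.List.pyRange 0 ((cs ++ [c]).length : Int) 1).map (fun i =>
        f (PySem.List.pyGetD (cs ++ [c]) i ' ') * n ^ (((cs ++ [c]).length : Int) - i - 1).toNat)).sum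
      = (((PySem.List.pyRange 0 (cs.length : Int) 1).map (fun i =>
        f (PySem.List.pyGetD cs i ' ') * n ^ ((cs.length : Int) - i - 1).toNat)).sum) * n + f c := by
  have hsplit : PySem.List.pyRange 0 ((cs ++ [c]).length : Int) 1
      = PySem.List.pyRange 0 (cs.length : Int) 1 ++ [(cs.length : Int)] := by
    have : ((cs ++ [c]).length : Int) = (cs.length : Int) + 1 := by simp
    rw [this, PySem.List.pyRange_one_succ_right (by positivity)]
  rw [hsplit]
  rw [List.map_append, List.sum_append]
  have hlast : f (PySem.List.pyGetD (cs ++ [c]) (cs.length : Int) ' ')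
      * n ^ (((cs ++ [c]).length : Int) - (cs.length : Int) - 1).toNat = f c := by
    rw [PySem.List.pyGetD_natCast]
    simp
  have hmap : (PySem.List.pyRange 0 (cs.length : Int) 1).map (fun i =>
      f (PySem.List.pyGetD (cs ++ [c]) i ' ') * n ^ (((cs ++ [c]).length : Int) - i - 1).toNat)
      = (PySem.List.pyRange 0 (cs.length : Int) 1).map (fun i =>
      (f (PySem.List.pyGetD cs i ' ') * n ^ ((cs.length : Int) - i - 1).toNat) * n) := by
    apply List.map_congr_left
    intro i hi
    rw [PySem.List.mem_pyRange_one] at hi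
    obtain ⟨h0, hlt⟩ := hi
    have hi' : PySem.List.pyGetD (cs ++ [c]) i ' ' = PySem.List.pyGetD cs i ' ' := by
      rw [PySem.List.pyGetD_eq_getElem _ _ h0 (by simp; omega),
          PySem.List.pyGetD_eq_getElem _ _ h0 (by simpa using hlt)]
      rw [List.getElem_append_left]
    have hexp : (((cs ++ [c]).length : Int) - i - 1).toNat
        = ((cs.length : Int) - i - 1).toNat + 1 := by
      simp only [List.length_append, List.length_cons, List.length_nil]
      omega
    rw [hi', hexp, pow_succ]
    ring
  rw [hmap]
  simp only [List.map_cons, List.map_nil, List.sum_cons, List.sum_nil, add_zero]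
  rw [hlast]
  congr 1
  exact List.sum_map_mul_right ..

-- A's sum equals B's Horner fold, by induction on the string from the right.
theorem kmer_sum_eq_horner (f : Char → Int) (n : Int) (cs : List Char) :
    ((PySem.List.pyRange 0 (cs.length : Int) 1).map (fun i =>
        f (PySem.List.pyGetD cs i ' ') * n ^ ((cs.length : Int) - i - 1).toNat)).sum
      = cs.foldl (fun h c => h * n + f c) 0 := by
  induction cs using List.reverseRecOn with
  | nil => simp [PySem.List.pyRange_one_eq_nil]
  | append_singleton t c ih => rw [sumA_append, horner_foldl_append, ih]

-- ===== VERDICT (by name: the statement is the Claim_ definition above) =====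
theorem get_hash_of_kmer_spec : Claim_equal_get_hash_of_kmer := by
  intro kmer letter_dict _ _
  unfold Spec_get_hash_of_kmer get_hash_of_kmer get_hash_of_kmer_alt
  simp only [PySem.Str.len_eq]
  exact kmer_sum_eq_horner
    (fun c => (PySem.Dict.mk letter_dict).getD (String.ofList [c]) (letter_dict.length : Int))
    (letter_dict.length : Int) kmer.toList
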